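-- pv_equiv track=rewrite | github.com/pypi-data/pypi-mirror-147 | packages/accelpy/accelpy-0.6.15.tar.gz/accelpy-0.6.15/accelpy/util.py | fortline_pack
-- ===== SOURCE A (Python) =====
-- def fortline_pack(items):
--
--     lines = [""]
--     maxlen = 72
--
--     for item in items:
--         if len(lines[-1]) + len(item) > maxlen:
--
--             lines[-1] += " &"
--             lines.append("        &, %s" % item)
--
--         elif lines[-1] == "":
--             lines[-1] += item
--
--         else:
--             lines[-1] += ", " + item
--
--     return lines
-- ===== SOURCE B (Python) =====
-- def fortline_pack(items):
--     # Pass 1: group items by running line length only (no string building).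
--     groups = [[]]
--     cur = 0
--     for item in items:
--         if cur + len(item) > 72:
--             groups.append([item])
--             cur = 11 + len(item)
--         elif cur == 0:
--             groups[-1].append(item)
--             cur = len(item)
--         else:
--             groups[-1].append(item)
--             cur += 2 + len(item)
--     # Pass 2: render each group, then mark every line but the last as continued.
--     lines = []
--     for idx, g in enumerate(groups):
--         if idx == 0:
--             s = ""
--             for it in g:
--                 s = it if s == "" else s + ", " + it
--         else:
--             s = "        &"
--             for it in g:
--                 s += ", " + it
--         lines.append(s)
--     return [l + " &" for l in lines[:-1]] + [lines[-1]]
-- ===== Notes on version B (the rewrite author's own statement) =====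
-- stated objective: alternative
-- what changed: A grows each output line string item by item inside one loop; B first groups the items using only a running length counter and then renders every line once in a second pass, marking continuation lines at the end.
import Mathlib
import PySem

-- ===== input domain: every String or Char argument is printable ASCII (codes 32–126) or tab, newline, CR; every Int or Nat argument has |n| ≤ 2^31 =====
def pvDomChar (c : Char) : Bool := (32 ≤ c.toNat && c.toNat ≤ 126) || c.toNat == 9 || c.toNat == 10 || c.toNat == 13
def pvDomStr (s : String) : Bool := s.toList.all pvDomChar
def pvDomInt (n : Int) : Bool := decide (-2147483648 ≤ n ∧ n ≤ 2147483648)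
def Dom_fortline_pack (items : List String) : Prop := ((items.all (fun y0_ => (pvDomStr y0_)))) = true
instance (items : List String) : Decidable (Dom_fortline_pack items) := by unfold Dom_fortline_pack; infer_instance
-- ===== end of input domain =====

-- B replaces A's single pass that grows the line strings in place with a two-pass
-- decomposition (group items by running length only, then render each line once);
-- objective: alternative decomposition, same cost.

-- ===== PORT A =====
-- A keeps `lines` with the line under construction last; the port keeps the list
-- REVERSED (head = lines[-1]) so each step rewrites the head, and reverses at the end.
def fortAstep (lines : List String) (item : String) : List String :=
  match lines with
  | [] => []  -- unreachable: the list is never empty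
  | last :: rest =>
    if PySem.Str.len last + PySem.Str.len item > 72 then
      ("        &, " ++ item) :: (last ++ " &") :: rest
    else if last = "" then
      (last ++ item) :: rest
    else
      (last ++ ", " ++ item) :: rest

def fortline_pack (items : List String) : List String :=
  (items.foldl fortAstep [""]).reverse

-- ===== PORT B =====
-- pass 1: groups are kept REVERSED (head = groups[-1]); each group's items are in order.
def appendLast (groups : List (List String)) (item : String) : List (List String) :=
  match groups with
  | [] => [[item]]  -- unreachable: groups is never empty
  | g :: gs => (g ++ [item]) :: gs

def fortGroupStep (st : List (List String) × Int) (item : String) : List (List String) × Int :=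
  if st.2 + PySem.Str.len item > 72 then
    ([item] :: st.1, 11 + PySem.Str.len item)
  else if st.2 = 0 then
    (appendLast st.1 item, PySem.Str.len item)
  else
    (appendLast st.1 item, st.2 + (2 + PySem.Str.len item))

-- pass 2: render one group (idx = 0: no prefix, separator only once nonempty;
-- later groups: the "        &" prefix and an unconditional ", " separator)
def renderFirst (g : List String) : String :=
  g.foldl (fun s it => if s = "" then it else s ++ ", " ++ it) ""

def renderLater (g : List String) : String :=
  g.foldl (fun s it => s ++ ", " ++ it) "        &"

def fortLines (groups : List (List String)) : List String :=
  (PySem.List.enumerate groups 0).map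
    (fun p => if p.1 = 0 then renderFirst p.2 else renderLater p.2)

-- return [l + " &" for l in lines[:-1]] + [lines[-1]]
def fortFinish (lines : List String) : List String :=
  (PySem.List.slice lines none (some (-1))).map (· ++ " &") ++ [PySem.List.pyGetD lines (-1) ""]

def fortline_pack_alt (items : List String) : List String :=
  fortFinish (fortLines ((items.foldl fortGroupStep ([[]], 0)).1.reverse))

-- ===== PRECONDITION & SPEC =====
def Spec_fortline_pack (items : List String) (out : List String) : Prop := out = fortline_pack_alt items
instance (items : List String) (out : List String) : Decidable (Spec_fortline_pack items out) := by unfold Spec_fortline_pack; infer_instance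

-- ===== CLAIM (what is proved, stated in full; the proofs are below) =====
def Claim_equal_fortline_pack : Prop := ∀ (items : List String), Dom_fortline_pack items → Spec_fortline_pack items (fortline_pack items)

-- ===== LEMMAS AND PROOFS =====

-- the rendering of the current (head) group: group 0 iff no groups below it
def rhead (g : List String) (gs : List (List String)) : String :=
  if gs.isEmpty then renderFirst g else renderLater g

-- reversed groups → reversed rendered lines (no " &" continuation marks yet)
def rlines : List (List String) → List String
  | [] => []
  | g :: gs => rhead g gs :: rlines gs

-- add " &" to every line except the head (= the last line)
def ampTail : List String → List String
  | [] => []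
  | l :: ls => l :: ls.map (· ++ " &")

lemma str_empty_iff (s : String) : s = "" ↔ PySem.Str.len s = 0 := by
  rw [PySem.Str.len_eq]
  constructor
  · rintro rfl; rfl
  · intro h
    apply String.ext
    have h0 : s.toList.length = 0 := by exact_mod_cast h
    simpa using List.length_eq_zero_iff.mp h0

lemma renderFirst_concat (g : List String) (a : String) :
    renderFirst (g ++ [a]) = if renderFirst g = "" then a else renderFirst g ++ ", " ++ a := by
  simp [renderFirst, List.foldl_append]

lemma renderLater_concat (g : List String) (a : String) :
    renderLater (g ++ [a]) = renderLater g ++ ", " ++ a := by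
  simp [renderLater, List.foldl_append]

lemma len_nonneg (s : String) : (0 : Int) ≤ PySem.Str.len s := by
  rw [PySem.Str.len_eq]; exact Int.natCast_nonneg _

lemma len_foldl_sep (g : List String) : ∀ s : String,
    PySem.Str.len s ≤ PySem.Str.len (g.foldl (fun s it => s ++ ", " ++ it) s) := by
  induction g with
  | nil => intro s; simp
  | cons a g ih =>
    intro s
    refine le_trans ?_ (ih (s ++ ", " ++ a))
    rw [PySem.Str.len_append, PySem.Str.len_append,
      show PySem.Str.len ", " = 2 from rfl]
    have := len_nonneg a
    omega

lemma renderLater_ne_empty (g : List String) : renderLater g ≠ "" := by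
  intro h
  have h9 := len_foldl_sep g "        &"
  rw [show (g.foldl (fun s it => s ++ ", " ++ it) "        &") = renderLater g from rfl, h] at h9
  revert h9; decide

lemma rhead_nil (g : List String) : rhead g [] = renderFirst g := rfl

lemma rhead_cons (g g' : List String) (gs : List (List String)) :
    rhead g (g' :: gs) = renderLater g := rfl

lemma rhead_concat_of_empty (g : List String) (gs : List (List String)) (a : String)
    (h : rhead g gs = "") : rhead (g ++ [a]) gs = a := by
  cases gs with
  | nil =>
    rw [rhead_nil] at h ⊢
    rw [renderFirst_concat, if_pos h]
  | cons g' gs' =>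
    rw [rhead_cons] at h
    exact absurd h (renderLater_ne_empty g)

lemma rhead_concat_of_ne (g : List String) (gs : List (List String)) (a : String)
    (h : rhead g gs ≠ "") : rhead (g ++ [a]) gs = rhead g gs ++ ", " ++ a := by
  cases gs with
  | nil =>
    rw [rhead_nil] at h
    rw [rhead_nil (g ++ [a]), rhead_nil g, renderFirst_concat, if_neg h]
  | cons g' gs' =>
    rw [rhead_cons, rhead_cons]
    exact renderLater_concat g a

lemma fortAstep_cons (last : String) (rest : List String) (item : String) :
    fortAstep (last :: rest) item =
      if PySem.Str.len last + PySem.Str.len item > 72 then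
        ("        &, " ++ item) :: (last ++ " &") :: rest
      else if last = "" then
        (last ++ item) :: rest
      else
        (last ++ ", " ++ item) :: rest := rfl

lemma fortGroupStep_pair (g : List String) (gs : List (List String)) (cur : Int) (item : String) :
    fortGroupStep (g :: gs, cur) item =
      if cur + PySem.Str.len item > 72 then
        ([item] :: g :: gs, 11 + PySem.Str.len item)
      else if cur = 0 then
        ((g ++ [item]) :: gs, PySem.Str.len item)
      else
        ((g ++ [item]) :: gs, cur + (2 + PySem.Str.len item)) := rfl

lemma loop_eq (items : List String) : ∀ (g : List String) (gs : List (List String)) (cur : Int),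
    cur = PySem.Str.len (rhead g gs) →
    List.foldl fortAstep (rhead g gs :: (rlines gs).map (· ++ " &")) items
      = ampTail (rlines (List.foldl fortGroupStep (g :: gs, cur) items).1) := by
  induction items with
  | nil => intro g gs cur _; simp [rlines, ampTail]
  | cons a items ih =>
    intro g gs cur hcur
    simp only [List.foldl_cons, fortAstep_cons, fortGroupStep_pair]
    by_cases h1 : PySem.Str.len (rhead g gs) + PySem.Str.len a > 72
    · -- overflow: start a new line / a new group
      rw [if_pos h1, if_pos (by omega : cur + PySem.Str.len a > 72)]
      have hh : rhead [a] (g :: gs) = "        &, " ++ a :=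
        (show rhead [a] (g :: gs) = ("        &" ++ ", ") ++ a from rfl).trans
          (by rw [show ("        &" : String) ++ ", " = "        &, " from rfl])
      have key := ih [a] (g :: gs) (11 + PySem.Str.len a)
        (by rw [hh, PySem.Str.len_append, show PySem.Str.len "        &, " = 11 from rfl])
      rw [hh, show rlines (g :: gs) = rhead g gs :: rlines gs from rfl] at key
      simpa using key
    · rw [if_neg h1, if_neg (by omega : ¬ cur + PySem.Str.len a > 72)]
      by_cases h2 : rhead g gs = ""
      · -- current line empty: append without separator
        rw [if_pos h2, if_pos (by rw [hcur, (str_empty_iff _).mp h2] : cur = 0)]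
        have hh : rhead (g ++ [a]) gs = a := rhead_concat_of_empty g gs a h2
        have key := ih (g ++ [a]) gs (PySem.Str.len a) (by rw [hh])
        rw [hh] at key
        rw [h2, String.empty_append]
        exact key
      · -- append with ", "
        rw [if_neg h2,
          if_neg (by rw [hcur]; exact fun h => h2 ((str_empty_iff _).mpr h) : ¬ cur = 0)]
        have hh : rhead (g ++ [a]) gs = rhead g gs ++ ", " ++ a := rhead_concat_of_ne g gs a h2
        have key := ih (g ++ [a]) gs (cur + (2 + PySem.Str.len a))
          (by rw [hh, PySem.Str.len_append, PySem.Str.len_append,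
                show PySem.Str.len ", " = 2 from rfl, hcur]; ring)
        rw [hh] at key
        exact key

lemma groups_ne_nil : ∀ (items : List String) (st : List (List String) × Int),
    st.1 ≠ [] → (items.foldl fortGroupStep st).1 ≠ [] := by
  intro items
  induction items with
  | nil => intro st h; exact h
  | cons a items ih =>
    intro st h
    rw [List.foldl_cons]
    apply ih
    obtain ⟨groups, cur⟩ := st
    simp only [fortGroupStep, appendLast]
    split_ifs <;> cases groups <;> simp_all

lemma render_eq (rg : List (List String)) :
    fortLines rg.reverse = (rlines rg).reverse := by
  induction rg with
  | nil => simp [fortLines, rlines]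
  | cons g gs ih =>
    rw [List.reverse_cons, fortLines, PySem.List.enumerate_append, List.map_append]
    rw [show (PySem.List.enumerate gs.reverse 0).map
          (fun p => if p.1 = 0 then renderFirst p.2 else renderLater p.2)
        = fortLines gs.reverse from rfl, ih]
    rw [show rlines (g :: gs) = rhead g gs :: rlines gs from rfl, List.reverse_cons]
    congr 1
    cases gs with
    | nil => simp [PySem.List.enumerate, rhead, renderFirst]
    | cons g' gs' =>
      simp [PySem.List.enumerate, rhead]
      intro hfalse
      exact absurd hfalse (by omega)

-- ===== VERDICT (by name: the statement is the Claim_ definition above) =====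
theorem fortline_pack_spec : Claim_equal_fortline_pack := by
  intro items _
  unfold Spec_fortline_pack fortline_pack fortline_pack_alt
  have h0 := loop_eq items [] [] 0 (by decide)
  rw [show rhead [] [] :: (rlines ([] : List (List String))).map (· ++ " &") = [""] by
      rfl] at h0
  rw [h0]
  set RG := (items.foldl fortGroupStep ([[]], 0)).1 with hRG
  have hne : RG ≠ [] := groups_ne_nil items ([[]], 0) (by simp)
  rw [render_eq RG]
  obtain ⟨l, ls, hL⟩ : ∃ l ls, rlines RG = l :: ls := by
    cases hRGc : RG with
    | nil => exact absurd hRGc hne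
    | cons g gs => exact ⟨rhead g gs, rlines gs, rfl⟩
  rw [hL]
  rw [List.reverse_cons, fortFinish, PySem.List.slice_to_neg_one, List.dropLast_concat,
    PySem.List.pyGetD_neg_one_append_singleton]
  simp [ampTail, List.map_reverse]
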